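-- pv_equiv track=rewrite | github.com/algo-test-study/coding-test-study | Week04/1117_PGS_배달_정성인.py | solution
-- ===== SOURCE A (Python) =====
-- import heapq
--
-- def dijkstra(graph, start):
--     INF = float('inf')
--     distance = [INF] * (len(graph))
--     distance[start] = 0
--     hq = [(0, start)]
--
--     while hq:
--         dist, node = heapq.heappop(hq)
--
--         if distance[node] < dist:
--             continue
--
--         for nxt_node, w in graph[node]:
--             nxt_dist = dist+w
--
--             if nxt_dist < distance[nxt_node]:
--                 distance[nxt_node] = nxt_dist
--                 heapq.heappush(hq, (nxt_dist, nxt_node))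
--     return distance
--
-- def solution(N, road, K):
--     answer = 0
--     graph= [[] for _ in range(N+1)]
--
--     for a, b, c in road:
--         graph[a].append((b, c))
--         graph[b].append((a, c))
--
--     distance = dijkstra(graph, 1)
--
--     for dist in distance:
--         if dist <= K:
--             answer += 1
--
--     return answer
-- ===== SOURCE B (Python) =====
-- def solution(N, road, K):
--     INF = float('inf')
--     adj = [[] for _ in range(N + 1)]
--     for a, b, c in road:
--         adj[a].append((b, c))
--         adj[b].append((a, c))
--     dist = [INF] * (N + 1)
--     dist[1] = 0
--     active = {1}
--     while active:
--         # global minimum tentative distance, ties broken by smaller node index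
--         v = min(active, key=lambda x: (dist[x], x))
--         active.remove(v)
--         for nxt, w in adj[v]:
--             nd = dist[v] + w
--             if nd < dist[nxt]:
--                 dist[nxt] = nd
--                 active.add(nxt)  # re-activate on improvement
--     return sum(1 for d in dist if d <= K)
-- ===== Notes on version B (the rewrite author's own statement) =====
-- stated objective: simpler
-- what changed: Replaces the heapq-based lazy-deletion Dijkstra (helper function, priority queue with stale entries that must be skipped) by a single loop that keeps an active set of nodes and selects the node with minimum (tentative distance, index) by a direct scan, re-activating a node whenever its distance improves.
-- outside the precondition, e.g. on solution(3, [(2, 3, -1)], 5): A returns 1, B returns 1; on solution(2, [(2, -1, 87)], 1): A returns 1, B returns 1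
import Mathlib
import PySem

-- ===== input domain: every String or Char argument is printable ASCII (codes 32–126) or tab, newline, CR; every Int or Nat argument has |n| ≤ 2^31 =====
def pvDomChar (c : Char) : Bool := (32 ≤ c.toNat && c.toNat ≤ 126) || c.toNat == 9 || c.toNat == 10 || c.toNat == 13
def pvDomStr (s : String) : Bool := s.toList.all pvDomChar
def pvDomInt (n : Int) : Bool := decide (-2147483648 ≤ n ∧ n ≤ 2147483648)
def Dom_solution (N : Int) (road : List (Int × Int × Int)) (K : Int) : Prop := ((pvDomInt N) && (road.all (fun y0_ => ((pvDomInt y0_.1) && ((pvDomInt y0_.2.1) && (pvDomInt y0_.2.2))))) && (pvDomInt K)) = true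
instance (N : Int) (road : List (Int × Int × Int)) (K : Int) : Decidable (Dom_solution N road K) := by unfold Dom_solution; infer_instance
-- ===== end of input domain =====

-- B replaces A's heapq lazy-deletion Dijkstra by an active-set scan-for-minimum loop
-- (objective: simpler — no heap, no helper, no stale-entry skipping); equal return value on Pre_.

-- ===== shared representation helpers =====
-- Python's float('inf') sentinel is modelled as `none`; every real distance is `some d`.
-- Both Pythons build the adjacency list with the same two appends, so the builder is shared.
-- Python list indexing with negative wraparound: xs[i] reads slot i+len for -len ≤ i < 0.
-- pIdx is exact for -len ≤ i < len, which Pre_ guarantees for every index either port uses.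
def pIdx (n : Nat) (i : Int) : Nat := (if i < 0 then i + n else i).toNat
def dGet (dist : List (Option Int)) (i : Int) : Option Int := dist.getD (pIdx dist.length i) none
def dSet (dist : List (Option Int)) (i : Int) (v : Option Int) : List (Option Int) :=
  dist.set (pIdx dist.length i) v
def gGet (G : List (List (Int × Int))) (i : Int) : List (Int × Int) := G.getD (pIdx G.length i) []
def buildGraph (N : Int) (road : List (Int × Int × Int)) : List (List (Int × Int)) :=
  road.foldl (fun g t =>
    let g1 := g.set (pIdx g.length t.1) (gGet g t.1 ++ [(t.2.1, t.2.2)])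
    g1.set (pIdx g1.length t.2.1) (gGet g1 t.2.1 ++ [(t.1, t.2.2)]))
  (List.replicate (N + 1).toNat [])

-- ===== PORT A =====
-- distance[node] < dist  (INF is smaller than nothing)
def oLtI (o : Option Int) (d : Int) : Bool := match o with | none => false | some x => decide (x < d)
-- nxt_dist < distance[nxt]  (everything is smaller than INF)
def iLtO (d : Int) (o : Option Int) : Bool := match o with | none => true | some x => decide (d < x)
-- dist <= K on a distance-list entry
def oLeI (o : Option Int) (k : Int) : Bool := match o with | none => false | some x => decide (x ≤ k)
-- tuple comparison (dist, node) < (dist, node) used by the heap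
def lexLt (p q : Int × Int) : Bool := decide (p.1 < q.1) || (decide (p.1 = q.1) && decide (p.2 < q.2))
-- heapq.heappop returns the minimum (dist, node) tuple; the heap is modelled as its multiset of entries
def popMinPair (h : Int × Int) (t : List (Int × Int)) : Int × Int :=
  t.foldl (fun m q => if lexLt q m then q else m) h

-- body of the `for nxt_node, w in graph[node]` relaxation loop (dist is the popped key)
def relaxA (d : Int) (s : List (Option Int) × List (Int × Int)) (e : Int × Int) :
    List (Option Int) × List (Int × Int) :=
  let nd := d + e.2
  if iLtO nd (dGet s.1 e.1) then (dSet s.1 e.1 (some nd), s.2 ++ [(nd, e.1)]) else s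

-- the `while hq:` loop of dijkstra; the fuel is proved sufficient under Pre_ (lemma sim_loop below)
def dijkstraLoop (graph : List (List (Int × Int))) : Nat → List (Option Int) → List (Int × Int) → List (Option Int)
  | 0, dist, _ => dist
  | _ + 1, dist, [] => dist
  | fuel + 1, dist, h :: t =>
    let m := popMinPair h t
    let rest := (h :: t).erase m
    if oLtI (dGet dist m.2) m.1 then dijkstraLoop graph fuel dist rest   -- stale entry: continue
    else
      let s := (gGet graph m.2).foldl (relaxA m.1) (dist, rest)
      dijkstraLoop graph fuel s.1 s.2

def dijkstra (graph : List (List (Int × Int))) (start : Int) : List (Option Int) :=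
  let distance := dSet (List.replicate graph.length (none : Option Int)) start (some 0)
  dijkstraLoop graph (graph.foldl (fun a l => a + l.length) 0 + 2) distance [(0, start)]

def solution (N : Int) (road : List (Int × Int × Int)) (K : Int) : Int :=
  let graph := buildGraph N road
  let distance := dijkstra graph 1
  distance.foldl (fun answer d => if oLeI d K then answer + 1 else answer) 0

-- ===== PORT B =====
-- (dist[x], x) < (dist[y], y), where float('inf') compares greater than every int
def bKeyLt (dist : List (Option Int)) (x y : Int) : Bool :=
  match dGet dist x, dGet dist y with
  | none, none => decide (x < y)
  | none, some _ => false
  | some _, none => true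
  | some a, some b => decide (a < b) || (decide (a = b) && decide (x < y))
-- min(active, key=lambda x: (dist[x], x)): the keys are pairwise distinct, so the minimum is
-- unique and independent of Python's set iteration order; the port scans the Set list.
def pickMin (dist : List (Option Int)) (h : Int) (t : List Int) : Int :=
  t.foldl (fun m x => if bKeyLt dist x m then x else m) h
-- dist[nxt] = nd stores an Option (inf + w stays inf); nd < dist[nxt] on Options
def oLtO (a b : Option Int) : Bool :=
  match a, b with | none, _ => false | some x, none => true | some x, some y => decide (x < y)

-- body of the `for nxt, w in adj[v]` loop: nd = dist[v] + w, re-activate on improvement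
def relaxB (v : Int) (s : List (Option Int) × List Int) (e : Int × Int) :
    List (Option Int) × List Int :=
  let nd := (dGet s.1 v).map (· + e.2)
  if oLtO nd (dGet s.1 e.1) then (dSet s.1 e.1 nd, PySem.Set.add s.2 e.1) else s

-- the `while active:` loop; same proved-sufficient fuel bound as A's loop
def bLoop (graph : List (List (Int × Int))) : Nat → List (Option Int) → List Int → List (Option Int)
  | 0, dist, _ => dist
  | _ + 1, dist, [] => dist
  | fuel + 1, dist, h :: t =>
    let v := pickMin dist h t
    let act := (h :: t).erase v          -- active.remove(v): v is the minimum, hence present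
    let s := (gGet graph v).foldl (relaxB v) (dist, act)
    bLoop graph fuel s.1 s.2

def solution_alt (N : Int) (road : List (Int × Int × Int)) (K : Int) : Int :=
  let adj := buildGraph N road
  let dist0 := dSet (List.replicate (N + 1).toNat (none : Option Int)) 1 (some 0)
  let dist := bLoop adj (adj.foldl (fun a l => a + l.length) 0 + 2) dist0 [1]
  ((dist.filter (fun d => oLeI d K)).length : Int)

-- ===== PRECONDITION & SPEC =====
-- where a node label u < 0 wraps, it denotes slot u+N+1 of the distance list
def nodeIdx (N : Int) (u : Int) : Int := if u < 0 then u + (N + 1) else u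
def roadNodes (road : List (Int × Int × Int)) : List Int :=
  1 :: road.flatMap (fun t => [t.1, t.2.1])
-- Pre_ excludes: N ≤ 0 and labels outside [-(N+1), N] (A raises IndexError there); negative
-- weights (the graph is undirected, so a negative edge reachable from node 1 lies on a negative
-- cycle and A loops forever; on instances whose negative edges are unreachable A returns and B
-- agrees, but the whole negative-weight class is excluded); and roads naming one node both by a
-- label and by its wrapped alias (Python indexing identifies them; both programs still agree
-- there, but the equivalence is proved only for uniquely-named nodes).
def Pre_solution (N : Int) (road : List (Int × Int × Int)) (K : Int) : Prop :=
  1 ≤ N ∧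
  (∀ t ∈ road, -(N + 1) ≤ t.1 ∧ t.1 ≤ N ∧ -(N + 1) ≤ t.2.1 ∧ t.2.1 ≤ N ∧ 0 ≤ t.2.2) ∧
  (∀ u ∈ roadNodes road, ∀ v ∈ roadNodes road, nodeIdx N u = nodeIdx N v → u = v)
instance (N : Int) (road : List (Int × Int × Int)) (K : Int) : Decidable (Pre_solution N road K) := by
  unfold Pre_solution; infer_instance
def pvWitness_solution : Int × (List (Int × Int × Int)) × Int := (2, [(1, 2, 3)], 3)

def Spec_solution (N : Int) (road : List (Int × Int × Int)) (K : Int) (out : Int) : Prop := out = solution_alt N road K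
instance (N : Int) (road : List (Int × Int × Int)) (K : Int) (out : Int) : Decidable (Spec_solution N road K out) := by unfold Spec_solution; infer_instance

-- ===== CLAIM (what is proved, stated in full; the proofs are below) =====
def Claim_equal_solution : Prop := ∀ (N : Int) (road : List (Int × Int × Int)) (K : Int), Dom_solution N road K → Pre_solution N road K → Spec_solution N road K (solution N road K)


-- remaining degree potential: heap pushes / set re-activations still possible
def degS (G : List (List (Int × Int))) (P : Finset ℕ) : ℕ :=
  ∑ u ∈ Finset.range G.length \ P, (G.getD u []).length

-- the joint invariant of A's (dist, hq) and B's (dist, active) states;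
-- P is the ghost set of already finalised nodes, m a lower bound on all heap keys
-- good labels: the labels a run can ever meet, with Python-index validity bounds
def VLab (G : List (List (Int × Int))) (Gd : Int → Prop) (u : Int) : Prop :=
  Gd u ∧ -(G.length : Int) ≤ u ∧ u < G.length

structure DInv (G : List (List (Int × Int))) (Gd : Int → Prop) (dist : List (Option Int))
    (hq : List (Int × Int)) (S : List Int) (P : Finset ℕ) (m : Int) : Prop where
  len : dist.length = G.length
  wg : ∀ l ∈ G, ∀ e ∈ l, 0 ≤ e.2 ∧ VLab G Gd e.1
  hqB : ∀ p ∈ hq, VLab G Gd p.2 ∧ m ≤ p.1 ∧ ∃ x, dGet dist p.2 = some x ∧ x ≤ p.1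
  fresh : ∀ v : Int, v ∈ S ↔ ∃ x, dGet dist v = some x ∧ (x, v) ∈ hq
  uniq : ∀ v x, VLab G Gd v → dGet dist v = some x → hq.count (x, v) ≤ 1
  nodupS : S.Nodup
  procLe : ∀ s ∈ P, ∃ x, dist.getD s none = some x ∧ x ≤ m
  disj : ∀ v ∈ S, pIdx G.length v ∉ P


-- ===== LEMMAS AND PROOFS =====

-- ---- generic scan-for-minimum lemmas ----
theorem foldMin_mem {α : Type} (lt : α → α → Bool) (h : α) (t : List α) :
    t.foldl (fun m q => if lt q m then q else m) h ∈ h :: t := by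
  induction t generalizing h with
  | nil => simp [List.foldl]
  | cons x t ih =>
    simp only [List.foldl]
    rcases List.mem_cons.1 (ih (if lt x h then x else h)) with hm | hm
    · rw [hm]; split <;> simp
    · simp [hm]

theorem foldMin_not_lt {α : Type} (lt : α → α → Bool)
    (htr : ∀ a b c, lt a b = true → lt b c = true → lt a c = true)
    (hco : ∀ a b c, lt a b = false → lt b c = false → lt a c = false)
    (hirr : ∀ a, lt a a = false)
    (h : α) (t : List α) :
    ∀ p ∈ h :: t, lt p (t.foldl (fun m q => if lt q m then q else m) h) = false := by
  induction t generalizing h with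
  | nil =>
    intro p hp
    simp at hp; subst hp
    simpa [List.foldl] using hirr p
  | cons x t ih =>
    intro p hp
    simp only [List.foldl]
    by_cases hx : lt x h = true
    · rw [if_pos hx]
      have hxr := ih x x (by simp)
      rcases List.mem_cons.1 hp with rfl | hp'
      · -- p = h : from lt x h and ¬ lt x r, conclude ¬ lt h r
        cases hr : lt p (t.foldl (fun m q => if lt q m then q else m) x) with
        | false => rfl
        | true => exact absurd (htr _ _ _ hx hr) (by simp [hxr])
      · rcases List.mem_cons.1 hp' with rfl | hp''
        · exact hxr
        · exact ih x p (by simp [hp''])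
    · rw [if_neg hx]
      have hhr := ih h h (by simp)
      rcases List.mem_cons.1 hp with rfl | hp'
      · exact hhr
      · rcases List.mem_cons.1 hp' with rfl | hp''
        · exact hco _ _ _ (by simpa using hx) hhr
        · exact ih h p (by simp [hp''])

-- ---- order facts ------ ---- order facts ----
theorem lexLt_iff (p q : Int × Int) : lexLt p q = true ↔ (p.1 < q.1 ∨ (p.1 = q.1 ∧ p.2 < q.2)) := by
  simp [lexLt]

theorem popMinPair_mem (h : Int × Int) (t : List (Int × Int)) : popMinPair h t ∈ h :: t :=
  foldMin_mem lexLt h t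

theorem popMinPair_min (h : Int × Int) (t : List (Int × Int)) :
    ∀ p ∈ h :: t, lexLt p (popMinPair h t) = false := by
  refine foldMin_not_lt lexLt ?_ ?_ ?_ h t
  · intro a b c hab hbc
    rw [lexLt_iff] at *; omega
  · intro a b c hab hbc
    rw [Bool.eq_false_iff, Ne, lexLt_iff] at *; omega
  · intro a
    rw [Bool.eq_false_iff, Ne, lexLt_iff]; omega

theorem bKeyLt_trans (dist : List (Option Int)) (a b c : Int) :
    bKeyLt dist a b = true → bKeyLt dist b c = true → bKeyLt dist a c = true := by
  unfold bKeyLt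
  rcases dGet dist a with _ | x <;> rcases dGet dist b with _ | y <;> rcases dGet dist c with _ | z <;>
    simp <;> omega

theorem bKeyLt_cotrans (dist : List (Option Int)) (a b c : Int) :
    bKeyLt dist a b = false → bKeyLt dist b c = false → bKeyLt dist a c = false := by
  unfold bKeyLt
  rcases dGet dist a with _ | x <;> rcases dGet dist b with _ | y <;> rcases dGet dist c with _ | z <;>
    simp <;> omega

theorem pickMin_mem (dist : List (Option Int)) (h : Int) (t : List Int) :
    pickMin dist h t ∈ h :: t :=
  foldMin_mem (bKeyLt dist) h t

theorem pickMin_min (dist : List (Option Int)) (h : Int) (t : List Int) :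
    ∀ p ∈ h :: t, bKeyLt dist p (pickMin dist h t) = false :=
  foldMin_not_lt (bKeyLt dist) (bKeyLt_trans dist) (bKeyLt_cotrans dist)
    (by intro a; unfold bKeyLt; rcases dGet dist a with _ | x <;> simp) h t

-- ---- indexing facts ----
theorem pIdx_lt (n : Nat) (i : Int) (h1 : -(n : Int) ≤ i) (h2 : i < n) : pIdx n i < n := by
  unfold pIdx; split <;> omega

theorem dGet_eq_getD (dist : List (Option Int)) (n : Nat) (u : Int) (h : dist.length = n) :
    dGet dist u = dist.getD (pIdx n u) none := by
  unfold dGet; rw [h]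

theorem dGet_dSet_self (dist : List (Option Int)) (i : Int) (v : Option Int)
    (hi : pIdx dist.length i < dist.length) : dGet (dSet dist i v) i = v := by
  simp [dGet, dSet, List.getD_eq_getElem?_getD, List.getElem?_set_self hi]

theorem dGet_dSet_ne (dist : List (Option Int)) (i j : Int) (v : Option Int)
    (hij : pIdx dist.length i ≠ pIdx dist.length j) : dGet (dSet dist i v) j = dGet dist j := by
  simp [dGet, dSet, List.getD_eq_getElem?_getD, List.getElem?_set_ne hij]

theorem getD_set_ne (dist : List (Option Int)) (s s' : Nat) (v : Option Int) (h : s' ≠ s) :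
    (dist.set s' v).getD s none = dist.getD s none := by
  simp [List.getD_eq_getElem?_getD, List.getElem?_set_ne h]

-- ---- graph construction facts ----
theorem foldl_build_length (road : List (Int × Int × Int)) :
    ∀ g : List (List (Int × Int)),
      (road.foldl (fun g t =>
        let g1 := g.set (pIdx g.length t.1) (gGet g t.1 ++ [(t.2.1, t.2.2)])
        g1.set (pIdx g1.length t.2.1) (gGet g1 t.2.1 ++ [(t.1, t.2.2)])) g).length = g.length := by
  induction road with
  | nil => intro g; rfl
  | cons t road ih => intro g; rw [List.foldl_cons, ih]; simp

theorem buildGraph_length (N : Int) (road : List (Int × Int × Int)) :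
    (buildGraph N road).length = (N + 1).toNat := by
  unfold buildGraph; rw [foldl_build_length]; simp

theorem gGet_entry {Q : (Int × Int) → Prop} (g : List (List (Int × Int))) (i : Int)
    (h : ∀ l ∈ g, ∀ e ∈ l, Q e) : ∀ e ∈ gGet g i, Q e := by
  intro e he
  unfold gGet at he
  rw [List.getD_eq_getElem?_getD] at he
  cases hg : g[pIdx g.length i]? with
  | none => rw [hg] at he; simp at he
  | some l =>
    rw [hg] at he
    exact h l (List.mem_of_getElem? hg) e he

theorem foldl_build_wg (N : Int) (road road0 : List (Int × Int × Int))
    (hpre : ∀ t ∈ road, -(N + 1) ≤ t.1 ∧ t.1 ≤ N ∧ -(N + 1) ≤ t.2.1 ∧ t.2.1 ≤ N ∧ 0 ≤ t.2.2)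
    (hsub : ∀ t ∈ road, t ∈ road0) :
    ∀ g : List (List (Int × Int)),
      (∀ l ∈ g, ∀ e ∈ l, 0 ≤ e.2 ∧ -(N + 1) ≤ e.1 ∧ e.1 ≤ N ∧ e.1 ∈ roadNodes road0) →
      ∀ l ∈ (road.foldl (fun g t =>
        let g1 := g.set (pIdx g.length t.1) (gGet g t.1 ++ [(t.2.1, t.2.2)])
        g1.set (pIdx g1.length t.2.1) (gGet g1 t.2.1 ++ [(t.1, t.2.2)])) g),
        ∀ e ∈ l, 0 ≤ e.2 ∧ -(N + 1) ≤ e.1 ∧ e.1 ≤ N ∧ e.1 ∈ roadNodes road0 := by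
  induction road with
  | nil => intro g hg; exact hg
  | cons t road ih =>
    intro g hg
    rw [List.foldl_cons]
    have ht := hpre t (by simp)
    have htm : t ∈ road0 := hsub t (by simp)
    have ht1 : t.1 ∈ roadNodes road0 :=
      List.mem_cons.2 (Or.inr (List.mem_flatMap.2 ⟨t, htm, by simp⟩))
    have ht2 : t.2.1 ∈ roadNodes road0 :=
      List.mem_cons.2 (Or.inr (List.mem_flatMap.2 ⟨t, htm, by simp⟩))
    refine ih (fun t' ht' => hpre t' (by simp [ht'])) (fun t' ht' => hsub t' (by simp [ht'])) _ ?_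
    intro l hl e he
    rcases List.mem_or_eq_of_mem_set hl with hl1 | rfl
    · rcases List.mem_or_eq_of_mem_set hl1 with hl2 | rfl
      · exact hg l hl2 e he
      · rcases List.mem_append.1 he with he1 | he1
        · exact gGet_entry (Q := fun e => 0 ≤ e.2 ∧ -(N + 1) ≤ e.1 ∧ e.1 ≤ N ∧ e.1 ∈ roadNodes road0)
            g t.1 (fun l hl e he => hg l hl e he) e he1
        · simp at he1; subst he1; exact ⟨ht.2.2.2.2, ht.2.2.1, ht.2.2.2.1, ht2⟩
    · rcases List.mem_append.1 he with he1 | he1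
      · refine gGet_entry (Q := fun e => 0 ≤ e.2 ∧ -(N + 1) ≤ e.1 ∧ e.1 ≤ N ∧ e.1 ∈ roadNodes road0)
          _ t.2.1 ?_ e he1
        intro l' hl' e' he'
        rcases List.mem_or_eq_of_mem_set hl' with hl2 | rfl
        · exact hg l' hl2 e' he'
        · rcases List.mem_append.1 he' with he2 | he2
          · exact gGet_entry (Q := fun e => 0 ≤ e.2 ∧ -(N + 1) ≤ e.1 ∧ e.1 ≤ N ∧ e.1 ∈ roadNodes road0)
              g t.1 (fun l hl e he => hg l hl e he) e' he2
          · simp at he2; subst he2; exact ⟨ht.2.2.2.2, ht.2.2.1, ht.2.2.2.1, ht2⟩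
      · simp at he1; subst he1; exact ⟨ht.2.2.2.2, ht.1, ht.2.1, ht1⟩

theorem buildGraph_wg (N : Int) (road : List (Int × Int × Int)) (hN : 1 ≤ N)
    (hpre : ∀ t ∈ road, -(N + 1) ≤ t.1 ∧ t.1 ≤ N ∧ -(N + 1) ≤ t.2.1 ∧ t.2.1 ≤ N ∧ 0 ≤ t.2.2) :
    ∀ l ∈ buildGraph N road, ∀ e ∈ l,
      0 ≤ e.2 ∧ VLab (buildGraph N road) (fun u => u ∈ roadNodes road) e.1 := by
  have hlen := buildGraph_length N road
  have h := foldl_build_wg N road road hpre (fun t ht => ht) (List.replicate (N + 1).toNat [])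
    (by simp)
  intro l hl e he
  obtain ⟨q1, q2, q3, q4⟩ := h l hl e he
  exact ⟨q1, q4, by rw [hlen]; omega, by rw [hlen]; omega⟩

-- ---- potential facts ----
theorem degS_empty (G : List (List (Int × Int))) : degS G ∅ = (G.map List.length).sum := by
  unfold degS
  rw [Finset.sdiff_empty]
  induction G with
  | nil => simp
  | cons l G ih =>
    rw [List.length_cons, Finset.sum_range_succ']
    simp only [List.getD_cons_succ, List.getD_cons_zero, List.map_cons, List.sum_cons]
    rw [ih]; omega

theorem degS_insert (G : List (List (Int × Int))) (P : Finset ℕ) (u : ℕ)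
    (hu : u < G.length) (hP : u ∉ P) :
    degS G (insert u P) + (G.getD u []).length = degS G P := by
  unfold degS
  have he : Finset.range G.length \ insert u P = (Finset.range G.length \ P).erase u := by
    ext x
    simp [Finset.mem_sdiff, Finset.mem_erase, Finset.mem_insert]
    tauto
  rw [he]
  exact Finset.sum_erase_add _ _ (by simp [Finset.mem_sdiff, hu, hP])


-- ---- option comparison bridges ----
theorem oLtO_some (d : Int) (o : Option Int) : oLtO (some d) o = iLtO d o := by
  cases o <;> simp [oLtO, iLtO]

theorem iLtO_lt {d x : Int} {o : Option Int} (h : iLtO d o = true) (hx : o = some x) : d < x := by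
  subst hx; simpa [iLtO] using h

-- ---- one relaxation step preserves the joint invariant ----
theorem relax_step (G : List (List (Int × Int))) (Gd : Int → Prop)
    (hinj : ∀ u u' : Int, VLab G Gd u → VLab G Gd u' →
      pIdx G.length u = pIdx G.length u' → u = u')
    (d v : Int) (e : Int × Int) (hv : VLab G Gd v) (he2 : 0 ≤ e.2) (heV : VLab G Gd e.1)
    (dist : List (Option Int)) (hq : List (Int × Int)) (S : List Int) (P : Finset ℕ)
    (I : DInv G Gd dist hq S P d) (dv : dGet dist v = some d) :
    (relaxA d (dist, hq) e).1 = (relaxB v (dist, S) e).1 ∧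
    DInv G Gd (relaxA d (dist, hq) e).1 (relaxA d (dist, hq) e).2 (relaxB v (dist, S) e).2 P d ∧
    (relaxA d (dist, hq) e).2.length ≤ hq.length + 1 ∧
    (relaxB v (dist, S) e).2.length ≤ S.length + 1 ∧
    dGet (relaxA d (dist, hq) e).1 v = some d := by
  unfold relaxA relaxB
  simp only [dv, Option.map_some]
  rw [oLtO_some]
  have hlen := I.len
  have hDg : ∀ u : Int, dGet dist u = dist.getD (pIdx G.length u) none :=
    fun u => dGet_eq_getD dist G.length u hlen
  by_cases hg : iLtO (d + e.2) (dGet dist e.1) = true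
  · rw [if_pos hg, if_pos hg]
    simp only
    -- the edge actually relaxes
    have hnev : e.1 ≠ v := by
      intro hev
      have := iLtO_lt hg (by rw [hev, dv])
      omega
    have hnxtP : pIdx G.length e.1 ∉ P := by
      intro hp
      obtain ⟨x, hx, hxle⟩ := I.procLe _ hp
      rw [← hDg] at hx
      have := iLtO_lt hg hx
      omega
    have hpl : pIdx dist.length e.1 < dist.length := by
      rw [hlen]; exact pIdx_lt _ _ heV.2.1 heV.2.2
    have hself : dGet (dSet dist e.1 (some (d + e.2))) e.1 = some (d + e.2) :=
      dGet_dSet_self _ _ _ hpl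
    have hne : ∀ u : Int, VLab G Gd u → u ≠ e.1 →
        dGet (dSet dist e.1 (some (d + e.2))) u = dGet dist u := by
      intro u hu hune
      refine dGet_dSet_ne _ _ _ _ ?_
      rw [hlen]
      exact fun h => hune ((hinj e.1 u heV hu h).symm)
    have hcnt0 : hq.count (d + e.2, e.1) = 0 := by
      rw [List.count_eq_zero]
      intro hmem
      obtain ⟨_, _, x, hx, hxle⟩ := I.hqB _ hmem
      have := iLtO_lt hg hx
      simp at hx hxle
      omega
    refine ⟨trivial, ?_, by simp, ?_, ?_⟩
    · constructor
      · simp [dSet, I.len]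
      · exact I.wg
      · -- hqB
        intro p hp
        rcases List.mem_append.1 hp with hp | hp
        · obtain ⟨pV, h3, x, hx, hxle⟩ := I.hqB p hp
          refine ⟨pV, h3, ?_⟩
          by_cases hpe : p.2 = e.1
          · rw [hpe] at hx ⊢
            have := iLtO_lt hg hx
            exact ⟨d + e.2, hself, by omega⟩
          · exact ⟨x, by rw [hne p.2 pV hpe]; exact hx, hxle⟩
        · simp at hp
          subst hp
          exact ⟨heV, by omega, d + e.2, hself, le_refl _⟩
      · -- fresh
        intro u
        constructor
        · intro hu
          rcases (PySem.Set.mem_add _ _ _).1 hu with hu | rfl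
          · obtain ⟨y, hy, hmem⟩ := (I.fresh u).1 hu
            have huV : VLab G Gd u := (I.hqB _ hmem).1
            by_cases hue : u = e.1
            · subst hue
              exact ⟨d + e.2, hself, by simp⟩
            · refine ⟨y, ?_, by simp [hmem]⟩
              rw [hne u huV hue]; exact hy
          · exact ⟨d + e.2, hself, by simp⟩
        · rintro ⟨y, hy, hmem⟩
          rcases List.mem_append.1 hmem with hmem | hmem
          · have huV : VLab G Gd u := (I.hqB _ hmem).1
            by_cases hue : u = e.1
            · subst hue
              exact (PySem.Set.mem_add _ _ _).2 (Or.inr rfl)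
            · rw [hne u huV hue] at hy
              exact (PySem.Set.mem_add _ _ _).2 (Or.inl ((I.fresh u).2 ⟨y, hy, hmem⟩))
          · simp [Prod.ext_iff] at hmem
            rw [hmem.2]
            exact (PySem.Set.mem_add _ _ _).2 (Or.inr rfl)
      · -- uniq
        intro u y huV hy
        rw [List.count_append]
        by_cases hue : u = e.1
        · subst hue
          rw [hself] at hy
          cases hy
          rw [hcnt0]
          simp
        · rw [hne u huV hue] at hy
          have h1 := I.uniq u y huV hy
          have : List.count (y, u) [(d + e.2, e.1)] = 0 := by
            simp [List.count_singleton]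
            intro _ h; exact absurd h.symm hue
          omega
      · exact PySem.Set.nodup_add _ _ I.nodupS
      · -- procLe (slot-level: the written slot is not a processed slot)
        intro s hs
        obtain ⟨x, hx, hxle⟩ := I.procLe s hs
        refine ⟨x, ?_, hxle⟩
        unfold dSet
        rw [getD_set_ne]
        · exact hx
        · rw [hlen]
          intro h
          rw [h] at hnxtP
          exact hnxtP hs
      · -- disj
        intro u hu
        rcases (PySem.Set.mem_add _ _ _).1 hu with hu | rfl
        · have := I.disj u hu
          simpa [dSet] using this
        · simpa [dSet] using hnxtP
    · -- |S'| ≤ |S| + 1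
      unfold PySem.Set.add
      split <;> simp
    · -- dist[v] untouched
      rw [hne v hv (Ne.symm hnev)]
      exact dv
  · rw [if_neg hg, if_neg hg]
    exact ⟨rfl, I, by show hq.length ≤ hq.length + 1; omega, by show S.length ≤ S.length + 1; omega, dv⟩

-- ---- the whole relaxation fold, jointly on both sides ----
theorem relax_fold (G : List (List (Int × Int))) (Gd : Int → Prop)
    (hinj : ∀ u u' : Int, VLab G Gd u → VLab G Gd u' →
      pIdx G.length u = pIdx G.length u' → u = u')
    (d v : Int) (hv : VLab G Gd v) (nb : List (Int × Int))
    (hnb : ∀ e ∈ nb, 0 ≤ e.2 ∧ VLab G Gd e.1) :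
    ∀ (dist : List (Option Int)) (hq : List (Int × Int)) (S : List Int) (P : Finset ℕ),
    DInv G Gd dist hq S P d → dGet dist v = some d →
    (nb.foldl (relaxA d) (dist, hq)).1 = (nb.foldl (relaxB v) (dist, S)).1 ∧
    DInv G Gd (nb.foldl (relaxA d) (dist, hq)).1 (nb.foldl (relaxA d) (dist, hq)).2
      (nb.foldl (relaxB v) (dist, S)).2 P d ∧
    (nb.foldl (relaxA d) (dist, hq)).2.length ≤ hq.length + nb.length ∧
    (nb.foldl (relaxB v) (dist, S)).2.length ≤ S.length + nb.length := by
  induction nb with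
  | nil => intro dist hq S P I dv; exact ⟨rfl, I, by simp, by simp⟩
  | cons e nb ih =>
    intro dist hq S P I dv
    obtain ⟨he2, heV⟩ := hnb e (by simp)
    obtain ⟨heq, I', hA, hB, dv'⟩ := relax_step G Gd hinj d v e hv he2 heV dist hq S P I dv
    simp only [List.foldl_cons]
    have hstA : relaxA d (dist, hq) e = ((relaxA d (dist, hq) e).1, (relaxA d (dist, hq) e).2) := rfl
    have hstB : relaxB v (dist, S) e = ((relaxB v (dist, S) e).1, (relaxB v (dist, S) e).2) := rfl
    rw [hstA, hstB, ← heq]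
    obtain ⟨q1, q2, q3, q4⟩ := ih (fun e he => hnb e (by simp [he]))
      (relaxA d (dist, hq) e).1 (relaxA d (dist, hq) e).2 (relaxB v (dist, S) e).2 P I' dv'
    refine ⟨q1, q2, by simpa using le_trans q3 (by omega), by simpa using le_trans q4 (by omega)⟩

-- ---- unfolding equations for the two loops ----
theorem bLoop_nil (G : List (List (Int × Int))) (fB : Nat) (dist : List (Option Int)) :
    bLoop G fB dist [] = dist := by cases fB <;> rfl

theorem bLoop_cons (G : List (List (Int × Int))) (fuel : Nat) (dist : List (Option Int))
    (h : Int) (t : List Int) :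
    bLoop G (fuel + 1) dist (h :: t) =
      bLoop G fuel
        ((gGet G (pickMin dist h t)).foldl (relaxB (pickMin dist h t))
          (dist, (h :: t).erase (pickMin dist h t))).1
        ((gGet G (pickMin dist h t)).foldl (relaxB (pickMin dist h t))
          (dist, (h :: t).erase (pickMin dist h t))).2 := rfl

theorem dijkstraLoop_cons (G : List (List (Int × Int))) (fuel : Nat) (dist : List (Option Int))
    (h : Int × Int) (t : List (Int × Int)) :
    dijkstraLoop G (fuel + 1) dist (h :: t) =
      if oLtI (dGet dist (popMinPair h t).2) (popMinPair h t).1 then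
        dijkstraLoop G fuel dist ((h :: t).erase (popMinPair h t))
      else
        dijkstraLoop G fuel
          ((gGet G (popMinPair h t).2).foldl (relaxA (popMinPair h t).1)
            (dist, (h :: t).erase (popMinPair h t))).1
          ((gGet G (popMinPair h t).2).foldl (relaxA (popMinPair h t).1)
            (dist, (h :: t).erase (popMinPair h t))).2 := rfl

-- ---- the main simulation: A's heap loop and B's active-set loop compute the same distances ----
theorem sim_loop (G : List (List (Int × Int))) (Gd : Int → Prop)
    (hinj : ∀ u u' : Int, VLab G Gd u → VLab G Gd u' →
      pIdx G.length u = pIdx G.length u' → u = u') :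
    ∀ fA fB (dist : List (Option Int)) (hq : List (Int × Int)) (S : List Int) (P : Finset ℕ)
      (m : Int),
    DInv G Gd dist hq S P m →
    hq.length + degS G P ≤ fA → S.length + degS G P ≤ fB →
    dijkstraLoop G fA dist hq = bLoop G fB dist S := by
  intro fA
  induction fA with
  | zero =>
    intro fB dist hq S P m I hA hB
    have hq0 : hq = [] := by
      cases hq with
      | nil => rfl
      | cons a b => rw [List.length_cons] at hA; omega
    subst hq0
    have hS : S = [] := by
      rw [List.eq_nil_iff_forall_not_mem]
      intro v hv
      obtain ⟨y, hy, hm⟩ := (I.fresh v).1 hv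
      simp at hm
    rw [hS, bLoop_nil]
    rfl
  | succ fA ih =>
    intro fB dist hq S P m I hA hB
    cases hq with
    | nil =>
      have hS : S = [] := by
        rw [List.eq_nil_iff_forall_not_mem]
        intro v hv
        obtain ⟨y, hy, hm⟩ := (I.fresh v).1 hv
        simp at hm
      rw [hS, bLoop_nil]
      rfl
    | cons h t =>
      have hmem := popMinPair_mem h t
      have hmin := popMinPair_min h t
      obtain ⟨hvV, hm, x, hx, hxle⟩ := I.hqB _ hmem
      rw [dijkstraLoop_cons]
      have hrlen : ((h :: t).erase (popMinPair h t)).length = t.length := by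
        rw [List.length_erase_of_mem hmem]; rfl
      by_cases hst : oLtI (dGet dist (popMinPair h t).2) (popMinPair h t).1 = true
      · -- stale entry: A drops it, B's state is untouched
        rw [if_pos hst]
        refine ih fB dist _ S P m ?_ (by rw [hrlen]; rw [List.length_cons] at hA; omega) hB
        have hxlt : x < (popMinPair h t).1 := by
          rw [hx] at hst; simpa [oLtI] using hst
        constructor
        · exact I.len
        · exact I.wg
        · exact fun p hp => I.hqB p (List.mem_of_mem_erase hp)
        · intro u
          constructor
          · intro hu
            obtain ⟨y, hy, hmm⟩ := (I.fresh u).1 hu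
            refine ⟨y, hy, ?_⟩
            rw [List.mem_erase_of_ne ?_]
            · exact hmm
            · intro hcon
              have h2 : u = (popMinPair h t).2 := congrArg Prod.snd hcon
              have h1 : y = (popMinPair h t).1 := congrArg Prod.fst hcon
              rw [h2] at hy
              rw [hy] at hx
              cases hx
              omega
          · rintro ⟨y, hy, hmm⟩
            exact (I.fresh u).2 ⟨y, hy, List.mem_of_mem_erase hmm⟩
        · intro u y huV hy
          have := I.uniq u y huV hy
          rw [List.count_erase]
          omega
        · exact I.nodupS
        · exact I.procLe
        · exact I.disj
      · -- fresh entry: this is one step of B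
        rw [if_neg hst]
        have hxeq : x = (popMinPair h t).1 := by
          rw [hx] at hst; simp [oLtI] at hst; omega
        have hx' : dGet dist (popMinPair h t).2 = some (popMinPair h t).1 := by
          rw [← hxeq]; exact hx
        have hmpeta : ((popMinPair h t).1, (popMinPair h t).2) = popMinPair h t := rfl
        have hvS : (popMinPair h t).2 ∈ S :=
          (I.fresh _).2 ⟨(popMinPair h t).1, hx', by rw [hmpeta]; exact hmem⟩
        cases S with
        | nil => simp at hvS
        | cons s0 s1 =>
        cases fB with
        | zero => exfalso; rw [List.length_cons] at hB; omega
        | succ fB' =>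
        have hpmem := pickMin_mem dist s0 s1
        have hpmin := pickMin_min dist s0 s1
        obtain ⟨yr, hyr, hmemr⟩ := (I.fresh _).1 hpmem
        have hb1 := hpmin _ hvS
        have hb2 := hmin (yr, pickMin dist s0 s1) hmemr
        have hrv : pickMin dist s0 s1 = (popMinPair h t).2 := by
          unfold bKeyLt at hb1
          rw [hx', hyr] at hb1
          simp at hb1
          rw [Bool.eq_false_iff, Ne, lexLt_iff] at hb2
          simp at hb2
          omega
        rw [bLoop_cons, hrv]
        -- joint invariant after removing the selected node
        have hvP : pIdx G.length (popMinPair h t).2 ∉ P := I.disj _ hvS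
        have hcntmp := I.uniq _ _ hvV hx'
        rw [hmpeta] at hcntmp
        have I2 : DInv G Gd dist ((h :: t).erase (popMinPair h t))
            ((s0 :: s1).erase (popMinPair h t).2)
            (insert (pIdx G.length (popMinPair h t).2) P) (popMinPair h t).1 := by
          constructor
          · exact I.len
          · exact I.wg
          · intro p hp
            obtain ⟨pV, p2, z, hz, hzle⟩ := I.hqB p (List.mem_of_mem_erase hp)
            have := hmin p (List.mem_of_mem_erase hp)
            rw [Bool.eq_false_iff, Ne, lexLt_iff] at this
            exact ⟨pV, by omega, z, hz, hzle⟩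
          · intro u
            constructor
            · intro hu
              obtain ⟨hune, huS⟩ := I.nodupS.mem_erase_iff.1 hu
              obtain ⟨y, hy, hmm⟩ := (I.fresh u).1 huS
              refine ⟨y, hy, (List.mem_erase_of_ne ?_).2 hmm⟩
              intro hcon
              exact hune (congrArg Prod.snd hcon)
            · rintro ⟨y, hy, hmm⟩
              have huS := (I.fresh u).2 ⟨y, hy, List.mem_of_mem_erase hmm⟩
              refine I.nodupS.mem_erase_iff.2 ⟨?_, huS⟩
              intro hcon
              rw [hcon] at hy
              rw [hy] at hx'
              injection hx' with hyx
              have hmm2 := hmm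
              rw [hcon, hyx] at hmm2
              rw [hmpeta] at hmm2
              have hc := List.count_pos_iff.2 hmm2
              rw [List.count_erase] at hc
              simp at hc
              omega
          · intro u y huV hy
            have := I.uniq u y huV hy
            rw [List.count_erase]
            omega
          · exact I.nodupS.erase _
          · intro s hs
            rcases Finset.mem_insert.1 hs with rfl | hs
            · exact ⟨(popMinPair h t).1,
                by rw [← dGet_eq_getD dist G.length (popMinPair h t).2 I.len]; exact hx', le_refl _⟩
            · obtain ⟨z, hz, hzle⟩ := I.procLe s hs
              exact ⟨z, hz, by omega⟩
          · intro u hu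
            obtain ⟨hune, huS⟩ := I.nodupS.mem_erase_iff.1 hu
            obtain ⟨y, hy, hmm⟩ := (I.fresh u).1 huS
            have huV : VLab G Gd u := (I.hqB _ hmm).1
            rw [Finset.mem_insert]
            push Not
            exact ⟨fun hp => hune (hinj u (popMinPair h t).2 huV hvV hp), I.disj u huS⟩
        have hnb : ∀ e ∈ gGet G (popMinPair h t).2, 0 ≤ e.2 ∧ VLab G Gd e.1 :=
          gGet_entry (Q := fun e => 0 ≤ e.2 ∧ VLab G Gd e.1) G _ I.wg
        obtain ⟨heq, I3, hA3, hB3⟩ :=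
          relax_fold G Gd hinj (popMinPair h t).1 (popMinPair h t).2 hvV (gGet G (popMinPair h t).2) hnb
            dist ((h :: t).erase (popMinPair h t)) ((s0 :: s1).erase (popMinPair h t).2)
            (insert (pIdx G.length (popMinPair h t).2) P) I2 hx'
        have hdeg := degS_insert G P (pIdx G.length (popMinPair h t).2)
          (pIdx_lt _ _ hvV.2.1 hvV.2.2) hvP
        have halen : ((s0 :: s1).erase (popMinPair h t).2).length = s1.length := by
          rw [List.length_erase_of_mem hvS]; rfl
        rw [← heq]
        refine ih fB' _ _ _ _ _ I3 ?_ ?_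
        · have : (gGet G (popMinPair h t).2).length
              = (G.getD (pIdx G.length (popMinPair h t).2) []).length := rfl
          simp at hA
          omega
        · have : (gGet G (popMinPair h t).2).length
              = (G.getD (pIdx G.length (popMinPair h t).2) []).length := rfl
          simp at hB
          omega

-- ---- the final count over the distance list ----
theorem count_fold (K : Int) (l : List (Option Int)) : ∀ acc : Int,
    l.foldl (fun a d => if oLeI d K then a + 1 else a) acc =
      acc + ((l.filter (fun d => oLeI d K)).length : Int) := by
  induction l with
  | nil => intro acc; simp
  | cons o l ih =>
    intro acc
    simp only [List.foldl_cons, List.filter_cons]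
    by_cases h : oLeI o K = true
    · rw [if_pos h, if_pos h, ih]
      simp
      omega
    · rw [if_neg h, if_neg h, ih]

theorem foldl_len_eq (G : List (List (Int × Int))) : ∀ acc : Nat,
    G.foldl (fun a l => a + l.length) acc = acc + (G.map List.length).sum := by
  induction G with
  | nil => intro acc; simp
  | cons l G ih =>
    intro acc
    rw [List.foldl_cons, ih]
    simp
    omega

theorem pIdx_one (n : Nat) : pIdx n 1 = 1 := by unfold pIdx; simp

theorem roadNodes_inj (N : Int) (road : List (Int × Int × Int)) (hN : 1 ≤ N)
    (hinj : ∀ u ∈ roadNodes road, ∀ v ∈ roadNodes road, nodeIdx N u = nodeIdx N v → u = v) :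
    ∀ u u' : Int, VLab (buildGraph N road) (fun w => w ∈ roadNodes road) u →
      VLab (buildGraph N road) (fun w => w ∈ roadNodes road) u' →
      pIdx (buildGraph N road).length u = pIdx (buildGraph N road).length u' → u = u' := by
  have hlen := buildGraph_length N road
  have hlenI : ((buildGraph N road).length : Int) = N + 1 := by rw [hlen]; omega
  rintro u u' ⟨hu, hub1, hub2⟩ ⟨hu', hub1', hub2'⟩ h
  refine hinj u hu u' hu' ?_
  have e1 : (pIdx (buildGraph N road).length u : Int) = nodeIdx N u := by
    unfold pIdx nodeIdx; split <;> omega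
  have e2 : (pIdx (buildGraph N road).length u' : Int) = nodeIdx N u' := by
    unfold pIdx nodeIdx; split <;> omega
  rw [← e1, ← e2]
  exact_mod_cast congrArg (Nat.cast : Nat → Int) h

theorem initial_inv (N : Int) (road : List (Int × Int × Int)) (hN : 1 ≤ N)
    (hroad : ∀ t ∈ road, -(N + 1) ≤ t.1 ∧ t.1 ≤ N ∧ -(N + 1) ≤ t.2.1 ∧ t.2.1 ≤ N ∧ 0 ≤ t.2.2) :
    DInv (buildGraph N road) (fun w => w ∈ roadNodes road)
      (dSet (List.replicate (buildGraph N road).length (none : Option Int)) 1 (some 0))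
      [(0, 1)] [1] ∅ 0 := by
  have hlen := buildGraph_length N road
  have hwg := buildGraph_wg N road hN hroad
  have h2 : 2 ≤ (buildGraph N road).length := by rw [hlen]; omega
  have h1V : VLab (buildGraph N road) (fun w => w ∈ roadNodes road) 1 :=
    ⟨by unfold roadNodes; simp, by omega, by omega⟩
  have hd1 : dGet (dSet (List.replicate (buildGraph N road).length (none : Option Int)) 1 (some 0)) 1
      = some 0 := by
    refine dGet_dSet_self _ _ _ ?_
    simp [pIdx_one]
    omega
  constructor
  · simp [dSet]
  · exact hwg
  · intro p hp
    simp at hp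
    subst hp
    exact ⟨h1V, le_refl _, 0, hd1, le_refl _⟩
  · intro u
    constructor
    · intro hu
      simp at hu
      subst hu
      exact ⟨0, hd1, by simp⟩
    · rintro ⟨y, hy, hm⟩
      simp [Prod.ext_iff] at hm
      simp [hm.2]
    -- done
  · intro u y _ _
    have : List.count (y, u) [((0 : Int), (1 : Int))] ≤ [((0 : Int), (1 : Int))].length :=
      List.count_le_length
    simpa using this
  · simp
  · intro s hs
    simp at hs
  · intro v hv
    simp

-- ===== VERDICT (by name: the statement is the Claim_ definition above) =====
theorem solution_spec : Claim_equal_solution := by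
  intro N road K hdom hpre
  obtain ⟨hN, hroad, hnames⟩ := hpre
  unfold Spec_solution solution solution_alt dijkstra
  have hlen := buildGraph_length N road
  simp only
  rw [count_fold]
  have hdists :
      dijkstraLoop (buildGraph N road) ((buildGraph N road).foldl (fun a l => a + l.length) 0 + 2)
        (dSet (List.replicate (buildGraph N road).length (none : Option Int)) 1 (some 0))
        [(0, 1)]
      = bLoop (buildGraph N road) ((buildGraph N road).foldl (fun a l => a + l.length) 0 + 2)
        (dSet (List.replicate (buildGraph N road).length (none : Option Int)) 1 (some 0)) [1] := by
    refine sim_loop (buildGraph N road) (fun w => w ∈ roadNodes road)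
      (roadNodes_inj N road hN hnames) _ _ _ _ _ ∅ 0 (initial_inv N road hN hroad) ?_ ?_ <;>
      rw [degS_empty, foldl_len_eq _ 0] <;> simp <;> omega
  rw [hdists, hlen]
  simp
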